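-- pv_equiv track=rewrite | github.com/Dilip9090/DSA_GFG | Difficulty: Easy/Natural Sum/natural-sum.py | find
-- ===== SOURCE A (Python) =====
-- def find(N):
--     x = 1 + 8 * N
--
--     # Manual square root (binary search)
--     left, right = 0, x
--
--     while left <= right:
--         mid = (left + right) // 2
--         if mid * mid == x:
--             root = mid
--             break
--         elif mid * mid < x:
--             left = mid + 1
--         else:
--             right = mid - 1
--     else:
--         return -1   # not perfect square
--
--     s = (root - 1) // 2
--
--     if s * (s + 1) // 2 == N:
--         return s
--
--     return -1
-- ===== SOURCE B (Python) =====
-- def find(N):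
--     total = 0
--     i = 0
--     while total < N:
--         i += 1
--         total += i
--     return i if total == N else -1
-- ===== Notes on version B (the rewrite author's own statement) =====
-- stated objective: simpler
-- what changed: Replaced the hand-written binary-search integer square root of 1+8N (plus a triangular check) by a single accumulation loop that adds successive integers until the running triangular sum reaches N.
import Mathlib
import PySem

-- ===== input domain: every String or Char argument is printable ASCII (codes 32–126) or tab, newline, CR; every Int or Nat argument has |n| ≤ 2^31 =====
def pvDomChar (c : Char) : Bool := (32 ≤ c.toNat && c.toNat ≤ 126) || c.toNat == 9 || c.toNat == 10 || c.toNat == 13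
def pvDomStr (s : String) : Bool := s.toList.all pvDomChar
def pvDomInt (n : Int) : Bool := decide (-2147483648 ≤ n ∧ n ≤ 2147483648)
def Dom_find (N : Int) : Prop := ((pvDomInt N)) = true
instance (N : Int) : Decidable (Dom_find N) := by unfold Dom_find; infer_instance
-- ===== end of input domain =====

-- B replaces A's binary-search integer square root of 1+8N by a simple accumulation
-- loop over successive triangular sums (objective: simpler).

-- ===== PORT A =====
-- the manual binary-search square-root loop of A (returns the root, or none = the
-- while loop's 'else' branch, i.e. no perfect square found)
def findRootAux (x left right : Int) : Option Int :=
  if h : left ≤ right then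
    let mid := PySem.Int.floordiv (left + right) 2
    if mid * mid = x then some mid
    else if mid * mid < x then findRootAux x (mid + 1) right
    else findRootAux x left (mid - 1)
  else none
termination_by (right + 1 - left).toNat
decreasing_by
  · have := PySem.Int.floordiv_two_mid_bounds h; omega
  · have := PySem.Int.floordiv_two_mid_bounds h; omega

def find (N : Int) : Int :=
  match findRootAux (1 + 8 * N) 0 (1 + 8 * N) with
  | none => -1
  | some root =>
    if PySem.Int.floordiv (PySem.Int.floordiv (root - 1) 2 * (PySem.Int.floordiv (root - 1) 2 + 1)) 2 = N
    then PySem.Int.floordiv (root - 1) 2 else -1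

-- ===== PORT B =====
-- the accumulation loop: while total < N: i += 1; total += i
def findLoop (N total : Int) (i : Nat) : Int × Nat :=
  if total < N then findLoop N (total + (i + 1)) (i + 1) else (total, i)
termination_by (N - total).toNat

def find_alt (N : Int) : Int :=
  let r := findLoop N 0 0
  if r.1 = N then (r.2 : Int) else -1

-- ===== PRECONDITION & SPEC =====
def Spec_find (N : Int) (out : Int) : Prop := out = find_alt N
instance (N : Int) (out : Int) : Decidable (Spec_find N out) := by unfold Spec_find; infer_instance

-- ===== CLAIM (what is proved, stated in full; the proofs are below) =====
def Claim_equal_find : Prop := ∀ (N : Int), Dom_find N → Spec_find N (find N)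

-- ===== LEMMAS AND PROOFS =====

-- triangular numbers
def tri : Nat → Int
  | 0 => 0
  | k + 1 => tri k + (k + 1)

lemma two_tri (k : Nat) : 2 * tri k = (k : Int) * (k + 1) := by
  induction k with
  | zero => simp [tri]
  | succ n ih => simp only [tri]; push_cast; nlinarith [ih]

lemma tri_lt_tri {i k : Nat} (h : i < k) : tri i < tri k := by
  induction k with
  | zero => omega
  | succ n ih =>
    have hn : (0:Int) ≤ (n:Int) := Int.natCast_nonneg n
    rcases Nat.lt_succ_iff_lt_or_eq.mp h with h' | h'
    · have := ih h'; simp only [tri]; linarith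
    · subst h'; simp only [tri]; linarith

-- exit characterization of B's loop
lemma findLoop_char (N : Int) : ∀ (fuel i : Nat), (N - tri i).toNat ≤ fuel →
    ∃ j, findLoop N (tri i) i = (tri j, j) ∧ i ≤ j ∧ N ≤ tri j ∧
      ∀ m, i ≤ m → m < j → tri m < N := by
  intro fuel
  induction fuel with
  | zero =>
    intro i hf
    have hle : N ≤ tri i := by omega
    refine ⟨i, ?_, le_refl i, hle, by omega⟩
    rw [findLoop]; simp [not_lt.mpr hle]
  | succ f ih =>
    intro i hf
    by_cases hlt : tri i < N
    · have htri : tri i + ((i : Int) + 1) = tri (i + 1) := by simp [tri]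
      obtain ⟨j, hj, hij, hNj, hall⟩ := ih (i + 1) (by
        have : tri i + 1 ≤ tri (i + 1) := by simp only [tri]; omega
        omega)
      refine ⟨j, ?_, by omega, hNj, ?_⟩
      · rw [findLoop]; simp only [if_pos hlt]
        rw [show (tri i + ((i : Int) + 1)) = tri (i + 1) from htri]
        exact hj
      · intro m him hmj
        rcases Nat.eq_or_lt_of_le him with h' | h'
        · subst h'; exact hlt
        · exact hall m h' hmj
    · refine ⟨i, ?_, le_refl i, by omega, by omega⟩
      rw [findLoop]; simp [hlt]

lemma find_alt_of_tri {k : Nat} {N : Int} (h : tri k = N) : find_alt N = (k : Int) := by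
  obtain ⟨j, hj, _, hNj, hall⟩ := findLoop_char N (N - tri 0).toNat 0 (le_refl _)
  have hjk : j = k := by
    by_contra hne
    rcases Nat.lt_or_ge j k with h' | h'
    · have := tri_lt_tri h'; omega
    · have hkj : k < j := by omega
      have := hall k (Nat.zero_le k) hkj; omega
  subst hjk
  simp only [find_alt, show tri 0 = 0 from rfl] at *
  rw [hj]; simp [h]

lemma find_alt_of_not_tri {N : Int} (h : ¬ ∃ k, tri k = N) : find_alt N = -1 := by
  obtain ⟨j, hj, -, -, -⟩ := findLoop_char N (N - tri 0).toNat 0 (le_refl _)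
  simp only [find_alt, show tri 0 = 0 from rfl] at *
  rw [hj]
  have : tri j ≠ N := fun hc => h ⟨j, hc⟩
  simp [this]

-- A's root search: soundness and completeness
lemma rootAux_some (x l r m : Int) : 0 ≤ l → findRootAux x l r = some m →
    0 ≤ m ∧ m * m = x := by
  fun_induction findRootAux x l r with
  | case1 l r h mid hsq =>
    intro hl he
    have hb := PySem.Int.floordiv_two_mid_bounds h
    simp only [Option.some.injEq] at he
    subst he
    exact ⟨by omega, hsq⟩
  | case2 l r h mid hsq hlt ih =>
    intro hl he
    have hb := PySem.Int.floordiv_two_mid_bounds h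
    exact ih (by omega) he
  | case3 l r h mid hsq hlt ih =>
    intro hl he
    exact ih hl he
  | case4 l r h => intro _ he; simp at he

lemma rootAux_none (x l r : Int) : 0 ≤ l → findRootAux x l r = none →
    ∀ m, l ≤ m → m ≤ r → m * m ≠ x := by
  fun_induction findRootAux x l r with
  | case1 l r h mid hsq => intro _ he; simp at he
  | case2 l r h mid hsq hlt ih =>
    intro hl he m hlm hmr hme
    have hb := PySem.Int.floordiv_two_mid_bounds h
    rcases (by omega : m ≤ mid ∨ mid + 1 ≤ m) with hc | hc
    · have hm0 : 0 ≤ m := by omega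
      have : m * m ≤ mid * mid := mul_le_mul hc hc hm0 (by omega)
      omega
    · exact ih (by omega) he m (by omega) hmr hme
  | case3 l r h mid hsq hlt ih =>
    intro hl he m hlm hmr hme
    have hb := PySem.Int.floordiv_two_mid_bounds h
    rcases (by omega : mid ≤ m ∨ m + 1 ≤ mid) with hc | hc
    · have hmid0 : 0 ≤ mid := by omega
      have : mid * mid ≤ m * m := mul_le_mul hc hc hmid0 (by omega)
      omega
    · exact ih hl he m hlm (by omega) hme
  | case4 l r h => intro _ _ m hlm hmr; omega

-- (2k+1)^2 = 1 + 8 * tri k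
lemma root_sq (k : Nat) : (2 * (k : Int) + 1) * (2 * (k : Int) + 1) = 1 + 8 * tri k := by
  have := two_tri k
  nlinarith [this]

lemma find_main (N : Int) : find N = find_alt N := by
  unfold find
  rcases hr : findRootAux (1 + 8 * N) 0 (1 + 8 * N) with _ | m
  · -- no root: N is not triangular
    have hnt : ¬ ∃ k, tri k = N := by
      rintro ⟨k, hk⟩
      have hnone := rootAux_none (1 + 8 * N) 0 (1 + 8 * N) (le_refl 0) hr (2 * (k : Int) + 1)
      have hsq := root_sq k
      rw [hk] at hsq
      have hk0 : (0 : Int) ≤ (k : Int) := Int.natCast_nonneg k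
      have hub : 2 * (k : Int) + 1 ≤ 1 + 8 * N := by nlinarith
      exact hnone (by omega) hub hsq
    rw [find_alt_of_not_tri hnt]
  · -- root m found
    obtain ⟨hm0, hmsq⟩ := rootAux_some (1 + 8 * N) 0 (1 + 8 * N) m (le_refl 0) hr
    have hw : 0 ≤ m * m := mul_nonneg hm0 hm0
    have hN0 : 0 ≤ N := by omega
    -- m is odd: m = 2t+1 with t ≥ 0
    rcases Int.even_or_odd m with ⟨u, hu⟩ | ⟨t, ht⟩
    · exfalso
      have : (u + u) * (u + u) = 4 * (u * u) := by ring
      rw [hu] at hmsq; omega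
    · have ht0 : 0 ≤ t := by nlinarith
      have h2N : t * (t + 1) = 2 * N := by nlinarith
      set k := t.toNat with hk
      have hkt : (k : Int) = t := Int.toNat_of_nonneg ht0
      have htk : tri k = N := by
        have := two_tri k
        rw [hkt] at this; omega
      -- s = t, the triangular test passes, A returns t
      have hs : PySem.Int.floordiv (m - 1) 2 = t := by
        rw [PySem.Int.floordiv_eq_ediv_of_pos (by omega)]; omega
      have hst : PySem.Int.floordiv (t * (t + 1)) 2 = N := by
        rw [PySem.Int.floordiv_eq_ediv_of_pos (by omega), h2N]; omega
      simp only [hs, hst, if_true, find_alt_of_tri htk, hkt]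

-- ===== VERDICT (by name: the statement is the Claim_ definition above) =====
theorem find_spec : Claim_equal_find := by
  intro N _
  unfold Spec_find
  exact find_main N
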